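-- pv_equiv track=rewrite | github.com/PeterHiggins19/higgins-decomposition | HCI-CNT/atlas/stage2_locked.py | _year_range
-- ===== SOURCE A (Python) =====
-- def _year_range(j: dict) -> str:
--     inp = j["input"]
--     labels = inp.get("labels") or []
--     if not labels:
--         return ""
--     def to_int(s):
--         try:    return int(s)
--         except: return None
--     ints = [to_int(l) for l in labels]
--     if all(x is not None for x in ints):
--         return f"{min(ints)}-{max(ints)}"
--     return f"{labels[0]} → {labels[-1]}"
-- ===== SOURCE B (Python) =====
-- def _year_range(j: dict) -> str:
--     inp = j["input"]
--     labels = inp.get("labels") or []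
--     if not labels:
--         return ""
--     try:
--         ys = sorted(int(l) for l in labels)
--     except Exception:
--         return f"{labels[0]} → {labels[-1]}"
--     return f"{ys[0]}-{ys[-1]}"
-- ===== Notes on version B (the rewrite author's own statement) =====
-- stated objective: alternative
-- what changed: B sorts the parsed integers and reads the range off the sorted list's endpoints (ys[0], ys[-1]), with exception-driven control flow inside the parse replacing A's None-map plus all()/min()/max() passes.
import Mathlib
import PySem

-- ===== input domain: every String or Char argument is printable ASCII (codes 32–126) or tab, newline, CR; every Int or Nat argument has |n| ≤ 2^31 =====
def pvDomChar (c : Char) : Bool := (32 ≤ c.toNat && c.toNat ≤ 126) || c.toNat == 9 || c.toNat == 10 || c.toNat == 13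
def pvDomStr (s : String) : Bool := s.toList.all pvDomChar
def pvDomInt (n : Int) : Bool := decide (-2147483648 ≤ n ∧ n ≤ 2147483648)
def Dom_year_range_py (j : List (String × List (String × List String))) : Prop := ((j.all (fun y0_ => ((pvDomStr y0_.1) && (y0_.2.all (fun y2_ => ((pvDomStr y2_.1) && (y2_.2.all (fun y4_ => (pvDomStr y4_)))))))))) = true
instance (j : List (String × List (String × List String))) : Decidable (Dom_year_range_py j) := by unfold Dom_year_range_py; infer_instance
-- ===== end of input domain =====

-- B sorts the parsed integers and takes the sorted list's endpoints instead of A's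
-- None-map + all()/min()/max(); equal return values wherever A does not raise (Pre_: "input" key present).

-- ===== PORT A =====
def year_range_py (j : List (String × List (String × List String))) : String :=
  match (PySem.Dict.mk j).get? "input" with
  | none => ""          -- Python raises KeyError here; excluded by Pre_
  | some inp =>
    let labels := match (PySem.Dict.mk inp).get? "labels" with
      | none => []      -- .get returns None; 'None or []' is []
      | some ls => ls   -- an empty list is falsy, '[] or []' is [] as well
    if labels = [] then ""
    else
      let ints := labels.map PySem.Int.ofStr?
      if ints.all (·.isSome) then
        -- min(ints)/max(ints): in this branch every element is an int
        match PySem.List.min? (ints.filterMap id) (fun x => x),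
              PySem.List.max? (ints.filterMap id) (fun x => x) with
        | some mn, some mx => PySem.Int.toStr mn ++ "-" ++ PySem.Int.toStr mx
        | _, _ => ""    -- unreachable: labels ≠ []
      else
        match PySem.List.pyGet? labels 0, PySem.List.pyGet? labels (-1) with
        | some a, some b => a ++ " → " ++ b
        | _, _ => ""    -- unreachable: labels ≠ []

-- ===== PORT B =====
-- the generator 'int(l) for l in labels' consumed by sorted: first parse failure raises (none)
def yrParse : List String → Option (List Int)
  | [] => some []
  | l :: rest =>
    match PySem.Int.ofStr? l with
    | none => none
    | some v => (yrParse rest).map (v :: ·)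

def year_range_py_alt (j : List (String × List (String × List String))) : String :=
  -- Python raises KeyError when "input" is missing; excluded by Pre_
  ((PySem.Dict.mk j).get? "input").elim "" (fun inp =>
    let labels := ((PySem.Dict.mk inp).get? "labels").getD []
    if labels = [] then ""
    else
      match yrParse labels with
      | none =>           -- except: fall back to first → last label
        (((PySem.List.pyGet? labels 0).bind (fun a => (PySem.List.pyGet? labels (-1)).map
          (fun b => a ++ " → " ++ b))).getD "")
      | some vs =>
        let ys := PySem.List.sorted vs (fun x => x) false
        (((PySem.List.pyGet? ys 0).bind (fun a => (PySem.List.pyGet? ys (-1)).map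
          (fun b => PySem.Int.toStr a ++ "-" ++ PySem.Int.toStr b))).getD ""))

-- ===== PRECONDITION & SPEC =====
-- A raises KeyError when the top-level dict has no "input" key; both programs raise there.
def Pre_year_range_py (j : List (String × List (String × List String))) : Prop :=
  ((PySem.Dict.mk j).get? "input").isSome = true
instance (j : List (String × List (String × List String))) : Decidable (Pre_year_range_py j) := by unfold Pre_year_range_py; infer_instance
def pvWitness_year_range_py : (List (String × List (String × List String))) :=
  [("input", [("labels", ["1", "2"])])]
def Spec_year_range_py (j : List (String × List (String × List String))) (out : String) : Prop := out = year_range_py_alt j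
instance (j : List (String × List (String × List String))) (out : String) : Decidable (Spec_year_range_py j out) := by unfold Spec_year_range_py; infer_instance

-- ===== CLAIM (what is proved, stated in full; the proofs are below) =====
def Claim_equal_year_range_py : Prop := ∀ (j : List (String × List (String × List String))), Dom_year_range_py j → Pre_year_range_py j → Spec_year_range_py j (year_range_py j)

-- ===== LEMMAS AND PROOFS =====

-- yrParse succeeds iff every label parses, and then returns exactly the parsed values
theorem yrParse_eq_none (ls : List String) :
    yrParse ls = none ↔ ¬ (ls.map PySem.Int.ofStr?).all (·.isSome) := by
  induction ls with
  | nil => simp [yrParse]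
  | cons l rest ih =>
    cases h : PySem.Int.ofStr? l with
    | none => simp [yrParse, h]
    | some v => simp [yrParse, h, ih]

theorem yrParse_eq_some (ls : List String) (vs : List Int) (h : yrParse ls = some vs) :
    vs = ls.filterMap PySem.Int.ofStr? := by
  induction ls generalizing vs with
  | nil => simp [yrParse] at h; simp [h]
  | cons l rest ih =>
    cases hl : PySem.Int.ofStr? l with
    | none => simp [yrParse, hl] at h
    | some v =>
      simp only [yrParse, hl, Option.map_eq_some_iff] at h
      obtain ⟨vs', hvs', rfl⟩ := h
      simp [hl, ih vs' hvs']

-- on a nonempty list, the sorted list's head is min(xs) and its last element is max(xs)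
theorem sorted_head_min (v : Int) (t : List Int) :
    (PySem.List.sorted (v :: t) (fun x => x) false).head? =
      PySem.List.min? (v :: t) (fun x => x) := by
  have hne : PySem.List.sorted (v :: t) (fun x => x) false ≠ [] := by
    simp [PySem.List.sorted_eq_nil_iff]
  obtain ⟨m, tl, hs⟩ := List.exists_cons_of_ne_nil hne
  have hmem : m ∈ v :: t := by
    have := PySem.List.sorted_perm (v :: t) (fun x => x) false
    exact this.mem_iff.mp (by simp [hs])
  have hmle : ∀ y ∈ v :: t, m ≤ y := PySem.List.key_head_sorted_le _ _ hs
  rw [PySem.List.min?_id_cons]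
  have hmn : PySem.List.min? (v :: t) (fun x => x) = some (t.foldl min v) :=
    PySem.List.min?_id_cons v t
  have hmin_mem : t.foldl min v ∈ v :: t := PySem.List.min?_mem hmn
  have hmin_le : ∀ y ∈ v :: t, t.foldl min v ≤ y := PySem.List.min?_isMin hmn
  have : m = t.foldl min v := le_antisymm (hmle _ hmin_mem) (hmin_le _ hmem)
  simp [hs, this]

theorem sorted_last_max (v : Int) (t : List Int) :
    (PySem.List.sorted (v :: t) (fun x => x) false).getLast? =
      PySem.List.max? (v :: t) (fun x => x) := by
  have hne : PySem.List.sorted (v :: t) (fun x => x) false ≠ [] := by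
    simp [PySem.List.sorted_eq_nil_iff]
  have hlen : 0 < (PySem.List.sorted (v :: t) (fun x => x) false).length :=
    List.length_pos_iff.mpr hne
  have hlast : (PySem.List.sorted (v :: t) (fun x => x) false).getLast? =
      some (PySem.List.sorted (v :: t) (fun x => x) false)[(PySem.List.sorted (v :: t) (fun x => x) false).length - 1] := by
    rw [List.getLast?_eq_getElem?, List.getElem?_eq_getElem (by omega)]
  have hperm := PySem.List.sorted_perm (v :: t) (fun x => x) false
  have hlmem : (PySem.List.sorted (v :: t) (fun x => x) false)[(PySem.List.sorted (v :: t) (fun x => x) false).length - 1] ∈ v :: t :=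
    hperm.mem_iff.mp (List.getElem_mem _)
  have hge : ∀ y ∈ v :: t, y ≤ (PySem.List.sorted (v :: t) (fun x => x) false)[(PySem.List.sorted (v :: t) (fun x => x) false).length - 1] := by
    intro y hy
    obtain ⟨p, hp, hpy⟩ := List.getElem_of_mem (hperm.mem_iff.mpr hy)
    have := PySem.List.sorted_id_getElem_mono (v :: t)
      (p := p) (q := (PySem.List.sorted (v :: t) (fun x => x) false).length - 1) (by omega) (by omega)
    simpa [hpy] using this
  have hmx : PySem.List.max? (v :: t) (fun x => x) = some (t.foldl max v) :=
    PySem.List.max?_id_cons v t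
  have hmax_mem : t.foldl max v ∈ v :: t := PySem.List.max?_mem hmx
  have hmax_ge : ∀ y ∈ v :: t, y ≤ t.foldl max v := PySem.List.max?_isMax hmx
  have heq : (PySem.List.sorted (v :: t) (fun x => x) false)[(PySem.List.sorted (v :: t) (fun x => x) false).length - 1] = t.foldl max v :=
    le_antisymm (hmax_ge _ hlmem) (hge _ hmax_mem)
  rw [hlast, hmx, heq]

-- pyGet? at 0 / -1 on a nonempty list is head? / getLast?
theorem pyGet?_zero {α : Type} (xs : List α) (h : xs ≠ []) :
    PySem.List.pyGet? xs 0 = xs.head? := by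
  cases xs with
  | nil => simp at h
  | cons a t => simp [PySem.List.pyGet?, PySem.List.pyIdx?]

theorem pyGet?_neg_one {α : Type} (xs : List α) (h : xs ≠ []) :
    PySem.List.pyGet? xs (-1) = xs.getLast? := by
  have hlen : 0 < xs.length := List.length_pos_iff.mpr h
  have h2 : -(xs.length : Int) ≤ -1 := by omega
  simp only [PySem.List.pyGet?, PySem.List.pyIdx?]
  rw [if_neg (by omega), if_pos h2]
  simp only [Option.bind_some]
  rw [List.getLast?_eq_getElem?]
  norm_num

-- the two branch computations agree on any non-empty label list
theorem yr_branches (l0 : String) (rest : List String) :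
    (let labels := l0 :: rest
     let ints := labels.map PySem.Int.ofStr?
     if ints.all (·.isSome) then
        match PySem.List.min? (ints.filterMap id) (fun x => x),
              PySem.List.max? (ints.filterMap id) (fun x => x) with
        | some mn, some mx => PySem.Int.toStr mn ++ "-" ++ PySem.Int.toStr mx
        | _, _ => ""
     else
        match PySem.List.pyGet? labels 0, PySem.List.pyGet? labels (-1) with
        | some a, some b => a ++ " → " ++ b
        | _, _ => "")
    =
    (let labels := l0 :: rest
     match yrParse labels with
     | none =>
        (((PySem.List.pyGet? labels 0).bind (fun a => (PySem.List.pyGet? labels (-1)).map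
          (fun b => a ++ " → " ++ b))).getD "")
     | some vs =>
        let ys := PySem.List.sorted vs (fun x => x) false
        (((PySem.List.pyGet? ys 0).bind (fun a => (PySem.List.pyGet? ys (-1)).map
          (fun b => PySem.Int.toStr a ++ "-" ++ PySem.Int.toStr b))).getD "")) := by
  simp only []
  by_cases hall : ((l0 :: rest).map PySem.Int.ofStr?).all (·.isSome)
  · -- every label parses
    obtain ⟨vs, hvs⟩ : ∃ vs, yrParse (l0 :: rest) = some vs := by
      cases h : yrParse (l0 :: rest) with
      | none => exact absurd hall ((yrParse_eq_none _).mp h)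
      | some vs => exact ⟨vs, rfl⟩
    have hvs' : vs = (l0 :: rest).filterMap PySem.Int.ofStr? := yrParse_eq_some _ _ hvs
    have h0 : (PySem.Int.ofStr? l0).isSome := by
      simp [List.all_cons] at hall; exact hall.1
    obtain ⟨v, hv⟩ := Option.isSome_iff_exists.mp h0
    have hvs2 : vs = v :: rest.filterMap PySem.Int.ofStr? := by
      simp [hvs', hv]
    have hfm : ((l0 :: rest).map PySem.Int.ofStr?).filterMap id =
        v :: rest.filterMap PySem.Int.ofStr? := by
      simp [List.filterMap_map, hv, Function.comp]
    have hsne : PySem.List.sorted vs (fun x => x) false ≠ [] := by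
      simp [PySem.List.sorted_eq_nil_iff, hvs2]
    rw [if_pos hall, hvs]
    dsimp only
    rw [hvs2, hfm]
    have hsne2 : PySem.List.sorted (v :: rest.filterMap PySem.Int.ofStr?) (fun x => x) false ≠ [] := by
      simp [PySem.List.sorted_eq_nil_iff]
    rw [pyGet?_zero _ hsne2, pyGet?_neg_one _ hsne2, sorted_head_min, sorted_last_max]
    rw [PySem.List.min?_id_cons v _, PySem.List.max?_id_cons v _]
    simp
  · -- some label fails: both fall back to first → last
    have hfalse : ((l0 :: rest).map PySem.Int.ofStr?).all (·.isSome) = false :=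
      Bool.eq_false_iff.mpr hall
    have hnone : yrParse (l0 :: rest) = none := (yrParse_eq_none _).mpr hall
    rw [hfalse, hnone]
    rw [pyGet?_zero _ (List.cons_ne_nil l0 rest), pyGet?_neg_one _ (List.cons_ne_nil l0 rest)]
    obtain ⟨b, hb⟩ : ∃ b, (l0 :: rest).getLast? = some b := by
      cases h : (l0 :: rest).getLast? with
      | none => simp at h
      | some b => exact ⟨b, rfl⟩
    simp [hb]

-- ===== VERDICT (by name: the statement is the Claim_ definition above) =====
theorem year_range_py_spec : Claim_equal_year_range_py := by
  intro j _ _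
  unfold Spec_year_range_py year_range_py year_range_py_alt
  cases h1 : (PySem.Dict.mk j).get? "input" with
  | none => rfl
  | some inp =>
    dsimp only [Option.elim_some]
    cases h2 : (PySem.Dict.mk inp).get? "labels" with
    | none => simp
    | some ls =>
      cases ls with
      | nil => simp
      | cons l0 rest =>
        dsimp only [Option.getD_some]
        rw [if_neg (List.cons_ne_nil l0 rest), if_neg (List.cons_ne_nil l0 rest)]
        exact yr_branches l0 rest
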